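-- pv_equiv track=rewrite | github.com/deadletterq/advent-of-code-2025 | src/days/3/part1/__init__.py | solution
-- ===== SOURCE A (Python) =====
-- from typing import List
--
-- def solution(rows: List[List[int]]) -> int:
--   sum = 0
--   for i in range(len(rows)):
--     biggest_number_so_far = rows[i][0]
--     biggest_candidate = 0
--     for j in range(1, len(rows[i])):
--       biggest_candidate = max(biggest_candidate, int(f"{biggest_number_so_far}{rows[i][j]}"))
--       biggest_number_so_far = max(biggest_number_so_far, rows[i][j])
--     sum += biggest_candidate
--   return sum
-- ===== SOURCE B (Python) =====
-- from typing import List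
--
-- def solution(rows: List[List[int]]) -> int:
--   total = 0
--   for row in rows:
--     best = 0
--     for i, x in enumerate(row):
--       for y in row[i + 1:]:
--         best = max(best, int(f"{x}{y}"))
--     total += best
--   return total
-- ===== Notes on version B (the rewrite author's own statement) =====
-- stated objective: alternative
-- what changed: Replaces A's single interleaved running-max/candidate pass with a brute-force maximum over the concatenations of ALL ordered pairs (i<j) of the row; equal because int(f'{p}{y}') is monotone in p for y >= 0, so the best pair for each right element is the prefix maximum A tracks.
-- crash fix: On inputs containing an empty row (and no negative element after a row head, on which both raise ValueError first), A raises IndexError at rows[i][0] while B returns the sum with 0 contributed by the empty row. — e.g. on solution([[]]): A raises IndexError, B returns 0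
import Mathlib
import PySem

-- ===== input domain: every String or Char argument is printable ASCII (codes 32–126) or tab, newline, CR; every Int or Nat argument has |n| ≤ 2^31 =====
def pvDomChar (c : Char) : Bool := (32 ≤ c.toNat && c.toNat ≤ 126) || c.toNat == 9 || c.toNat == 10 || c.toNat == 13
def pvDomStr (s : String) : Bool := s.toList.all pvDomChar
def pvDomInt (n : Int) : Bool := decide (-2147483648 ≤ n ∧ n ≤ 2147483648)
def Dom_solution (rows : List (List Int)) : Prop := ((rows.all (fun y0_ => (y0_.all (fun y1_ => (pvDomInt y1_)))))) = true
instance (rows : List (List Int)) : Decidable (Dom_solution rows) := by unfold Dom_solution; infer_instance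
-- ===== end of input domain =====

-- B replaces A's interleaved running-max/candidate pass with a brute-force maximum over the
-- concatenations of ALL ordered pairs (i<j) of each row (equal since concatenation is monotone
-- in its left operand when the right one is nonnegative); same return value, not faster.

-- int(f"{a}{b}") : shared by both Pythons; none (ValueError) is excluded by Pre_solution
def concatParse (a b : Int) : Int :=
  (PySem.Int.ofStr? (PySem.Int.toStr a ++ PySem.Int.toStr b)).getD 0

-- ===== PORT A =====
def solution (rows : List (List Int)) : Int :=
  rows.foldl (fun s row =>
    let big0 := (PySem.List.pyGet? row 0).getD 0     -- rows[i][0]; none = IndexError, outside Pre_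
    let res := row.tail.foldl
      (fun (st : Int × Int) x => (max st.1 x, max st.2 (concatParse st.1 x))) (big0, 0)
    s + res.2) 0

-- ===== PORT B =====
def solution_alt (rows : List (List Int)) : Int :=
  rows.foldl (fun total row =>
    let best := (PySem.List.enumerate row 0).foldl (fun (best : Int) p =>
      (PySem.List.slice row (some (p.1 + 1)) none).foldl
        (fun best y => max best (concatParse p.2 y)) best) 0
    total + best) 0

-- ===== PRECONDITION & SPEC =====
-- Exactly where Python A returns: each row nonempty (else IndexError at row[0]) and every
-- element after the first nonnegative (a negative one puts '-' inside f"{p}{x}" → ValueError).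
def Pre_solution (rows : List (List Int)) : Prop :=
  (∀ row ∈ rows, row ≠ []) ∧ (∀ row ∈ rows, ∀ x ∈ row.tail, 0 ≤ x)
instance (rows : List (List Int)) : Decidable (Pre_solution rows) := by
  unfold Pre_solution; infer_instance
def pvWitness_solution : List (List Int) := [[3, 1, 7], [-2, 5]]

-- On inputs containing an empty row (and no negative tail element, on which both raise
-- ValueError): A raises IndexError at rows[i][0], B returns the sum with 0 for that row.
def Raises_solution (rows : List (List Int)) : Prop :=
  (∃ row ∈ rows, row = []) ∧ (∀ row ∈ rows, ∀ x ∈ row.tail, 0 ≤ x)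
instance (rows : List (List Int)) : Decidable (Raises_solution rows) := by
  unfold Raises_solution; infer_instance
def pvRaiseWitness_solution : List (List Int) := [[]]
def pvRaiseWitnessOut_solution : Int := 0

def Spec_solution (rows : List (List Int)) (out : Int) : Prop := out = solution_alt rows
instance (rows : List (List Int)) (out : Int) : Decidable (Spec_solution rows out) := by
  unfold Spec_solution; infer_instance

-- ===== CLAIM (what is proved, stated in full; the proofs are below) =====
def Claim_equal_solution : Prop :=
  ∀ (rows : List (List Int)), Dom_solution rows → Pre_solution rows →
    Spec_solution rows (solution rows)
def Claim_raises_solution : Prop :=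
  (∀ (rows : List (List Int)), Dom_solution rows → Raises_solution rows → ¬ Pre_solution rows) ∧
  (Dom_solution (pvRaiseWitness_solution) ∧ Raises_solution (pvRaiseWitness_solution) ∧
    solution_alt (pvRaiseWitness_solution) = pvRaiseWitnessOut_solution)

-- ===== LEMMAS AND PROOFS =====

/- Part 1: value of Python's int() on the digit strings produced by str(); the CPython parser
   is PySem.Int.ofChars?, whose digit loop is characterised here through a generic function g
   instantiated (by unification, at the use sites) with PySem's internal digit-value loop. -/

def dstep (a : Nat) (c : Char) : Nat := a * 10 + (c.toNat - '0'.toNat)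

theorem goSpec' (g : List Char → Bool → Nat → Option Nat)
    (h2 : ∀ c rest b acc, g (c :: rest) b acc =
      if c.isDigit then g rest true (acc * 10 + (c.toNat - '0'.toNat))
      else if c = '_' ∧ b = true then
        (match rest with
         | p :: _ => if p.isDigit then g rest false acc else none
         | [] => none)
      else none)
    (h1 : ∀ b acc, g [] b acc = if b then some acc else none) :
    ∀ (t : List Char) (acc : Nat), (∀ c ∈ t, c.isDigit) →
      g t true acc = some (t.foldl dstep acc) := by
  intro t
  induction t with
  | nil => intro acc _; rw [h1]; rfl
  | cons c rest ih =>
      intro acc hall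
      rw [h2, if_pos (hall c (by simp))]
      exact ih _ (fun x hx => hall x (by simp [hx]))

theorem digit_cases (d : Char) (h : d.isDigit) :
    d = '0' ∨ d = '1' ∨ d = '2' ∨ d = '3' ∨ d = '4' ∨ d = '5' ∨ d = '6' ∨ d = '7' ∨ d = '8' ∨ d = '9' := by
  simp only [Char.isDigit, decide_eq_true_eq, Bool.and_eq_true] at h
  obtain ⟨h1, h2⟩ := h
  have h1' : 48 ≤ d.val.toNat := by exact_mod_cast h1
  have h2' : d.val.toNat ≤ 57 := by exact_mod_cast h2
  have hv : d.val.toNat = 48 ∨ d.val.toNat = 49 ∨ d.val.toNat = 50 ∨ d.val.toNat = 51 ∨ d.val.toNat = 52 ∨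
      d.val.toNat = 53 ∨ d.val.toNat = 54 ∨ d.val.toNat = 55 ∨ d.val.toNat = 56 ∨ d.val.toNat = 57 := by omega
  rcases hv with h|h|h|h|h|h|h|h|h|h <;>
    [left; (right;left); (right;right;left); (right;right;right;left); (right;right;right;right;left);
     (right;right;right;right;right;left); (right;right;right;right;right;right;left);
     (right;right;right;right;right;right;right;left); (right;right;right;right;right;right;right;right;left);
     (right;right;right;right;right;right;right;right;right)] <;>
    · apply Char.ext; apply UInt32.toNat_inj.mp; simp [h]

theorem digit_not_space (c : Char) (h : c.isDigit) : PySem.Int.isIntSpace c = false := by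
  simp only [Char.isDigit, decide_eq_true_eq, Bool.and_eq_true] at h
  simp only [PySem.Int.isIntSpace, Bool.or_eq_false_iff, decide_eq_false_iff_not]
  obtain ⟨h1, h2⟩ := h
  refine ⟨⟨⟨⟨⟨?_, ?_⟩, ?_⟩, ?_⟩, ?_⟩, ?_⟩ <;> (rintro rfl; simp_all)

theorem strip_id (s : List Char) (h : ∀ c ∈ s, PySem.Int.isIntSpace c = false) :
    ((s.dropWhile PySem.Int.isIntSpace).reverse.dropWhile PySem.Int.isIntSpace).reverse = s := by
  have h1 : s.dropWhile PySem.Int.isIntSpace = s := by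
    cases s with
    | nil => rfl
    | cons c cs => rw [List.dropWhile_cons_of_neg]; simp [h c (by simp)]
  rw [h1]
  have h2 : s.reverse.dropWhile PySem.Int.isIntSpace = s.reverse := by
    cases hs : s.reverse with
    | nil => rfl
    | cons c cs =>
        rw [List.dropWhile_cons_of_neg]
        have hc : c ∈ s := by
          have : c ∈ s.reverse := by rw [hs]; simp
          simpa using this
        simp [h c hc]
  rw [h2, List.reverse_reverse]

theorem leaf_pos (w : Option Nat) (X : Nat) (hw : w = some X) :
    Option.map (fun n : Int => n) (Bind.bind w (fun a => Pure.pure ((a : Nat) : Int))) = some ((X : Nat) : Int) := by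
  subst hw; rfl

theorem leaf_neg (w : Option Nat) (X : Nat) (hw : w = some X) :
    Option.map (fun n : Int => -n) (Bind.bind w (fun a => Pure.pure ((a : Nat) : Int))) = some (-((X : Nat) : Int)) := by
  subst hw; rfl

theorem ofC_digits (d : Char) (t : List Char) (hall : ∀ c ∈ d :: t, c.isDigit) :
    PySem.Int.ofChars? (d :: t) = some (((d :: t).foldl dstep 0 : Nat) : Int) := by
  unfold PySem.Int.ofChars?
  rw [strip_id _ (fun c hc => digit_not_space c (hall c hc))]
  simp only []
  split
  case h_1 ds heq => injection heq with hh _; subst hh; exact absurd (hall '-' (by simp)) (by decide)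
  case h_2 ds heq => injection heq with hh _; subst hh; exact absurd (hall '+' (by simp)) (by decide)
  case h_3 =>
    refine leaf_pos _ _ ?_
    have htail : ∀ c ∈ t, c.isDigit := fun c hc => hall c (by simp [hc])
    rcases digit_cases d (hall d (by simp)) with rfl|rfl|rfl|rfl|rfl|rfl|rfl|rfl|rfl|rfl <;>
      · refine goSpec' _ ?_ ?_ t _ htail
        · exact fun _ _ _ _ => rfl
        · exact fun _ _ => rfl

theorem ofC_neg (d : Char) (t : List Char) (hall : ∀ c ∈ d :: t, c.isDigit) :
    PySem.Int.ofChars? ('-' :: d :: t) = some (-(((d :: t).foldl dstep 0 : Nat) : Int)) := by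
  unfold PySem.Int.ofChars?
  rw [strip_id _ ?hns]
  case hns =>
    intro c hc
    rcases List.mem_cons.mp hc with rfl | hc'
    · decide
    · exact digit_not_space c (hall c hc')
  simp only []
  refine leaf_neg _ _ ?_
  have htail : ∀ c ∈ t, c.isDigit := fun c hc => hall c (by simp [hc])
  rcases digit_cases d (hall d (by simp)) with rfl|rfl|rfl|rfl|rfl|rfl|rfl|rfl|rfl|rfl <;>
    · refine goSpec' _ ?_ ?_ t _ htail
      · exact fun _ _ _ _ => rfl
      · exact fun _ _ => rfl

/- Part 2: the digit string str() produces, via Nat.toDigitsCore. -/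

theorem digitChar_isDigit (m : Nat) (h : m < 10) :
    (Nat.digitChar m).isDigit = true ∧ (Nat.digitChar m).toNat - '0'.toNat = m := by
  interval_cases m <;> exact ⟨by decide, by decide⟩

theorem core_facts : ∀ (f n : Nat) (ds : List Char), n < f →
    ∃ out : List Char, Nat.toDigitsCore 10 f n ds = out ++ ds ∧ out ≠ [] ∧ (∀ c ∈ out, c.isDigit) ∧
      (∀ acc : Nat, out.foldl dstep acc = acc * 10 ^ out.length + n) := by
  intro f
  induction f with
  | zero => intro n ds h; omega
  | succ f ih =>
      intro n ds h
      rw [Nat.toDigitsCore]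
      by_cases h10 : n / 10 = 0
      · refine ⟨[(n % 10).digitChar], by simp [h10], by simp, ?_, ?_⟩
        · intro c hc
          rw [List.mem_singleton] at hc; subst hc
          exact (digitChar_isDigit _ (Nat.mod_lt _ (by omega))).1
        · intro acc
          have hd := (digitChar_isDigit (n % 10) (Nat.mod_lt _ (by omega))).2
          have hmod : n % 10 = n := by omega
          simp only [List.foldl_cons, List.foldl_nil, dstep, List.length_cons,
            List.length_nil]
          rw [hd, hmod]; norm_num
      · obtain ⟨out, heq, hne, hdig, hval⟩ := ih (n / 10) ((n % 10).digitChar :: ds) (by omega)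
        simp only [h10, if_false]
        refine ⟨out ++ [(n % 10).digitChar], by simp [heq], by simp, ?_, ?_⟩
        · intro c hc
          rcases List.mem_append.mp hc with hc' | hc'
          · exact hdig c hc'
          · rw [List.mem_singleton] at hc'; subst hc'
            exact (digitChar_isDigit _ (Nat.mod_lt _ (by omega))).1
        · intro acc
          have hd := (digitChar_isDigit (n % 10) (Nat.mod_lt _ (by omega))).2
          have key : n / 10 * 10 + n % 10 = n := by omega
          rw [List.foldl_append]
          simp only [List.foldl_cons, List.foldl_nil, dstep, hval acc, hd,
            List.length_append, List.length_cons, List.length_nil]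
          calc (acc * 10 ^ out.length + n / 10) * 10 + n % 10
              = acc * (10 ^ out.length * 10) + (n / 10 * 10 + n % 10) := by ring
            _ = acc * 10 ^ (out.length + (0 + 1)) + n := by
                  rw [key, show out.length + (0 + 1) = out.length + 1 by omega, pow_succ]

theorem toDigits_facts (m : Nat) :
    ∃ out : List Char, Nat.toDigits 10 m = out ∧ out ≠ [] ∧ (∀ c ∈ out, c.isDigit) ∧
      (∀ acc : Nat, out.foldl dstep acc = acc * 10 ^ out.length + m) := by
  obtain ⟨out, heq, hne, hdig, hval⟩ := core_facts (m + 1) m [] (by omega)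
  exact ⟨out, by simpa [Nat.toDigits] using heq, hne, hdig, hval⟩

/- Part 3: closed form and monotonicity of concatParse. -/

def kOf (b : Int) : Nat := (Nat.toDigits 10 b.toNat).length

theorem toChars_append_toList (a b : Int) :
    (PySem.Int.toStr a ++ PySem.Int.toStr b).toList = PySem.Int.toChars a ++ PySem.Int.toChars b := by
  rw [String.toList_append, PySem.Int.toList_toStr, PySem.Int.toList_toStr]

theorem concat_pos (a b : Int) (ha : 0 ≤ a) (hb : 0 ≤ b) :
    concatParse a b = a * 10 ^ kOf b + b := by
  obtain ⟨outA, heqA, hneA, hdigA, hvalA⟩ := toDigits_facts a.toNat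
  obtain ⟨outB, heqB, hneB, hdigB, hvalB⟩ := toDigits_facts b.toNat
  have hchA : PySem.Int.toChars a = outA := by
    rw [PySem.Int.toChars, if_neg (by omega), heqA]
  have hchB : PySem.Int.toChars b = outB := by
    rw [PySem.Int.toChars, if_neg (by omega), heqB]
  unfold concatParse
  rw [PySem.Int.ofStr?.eq_1, toChars_append_toList, hchA, hchB]
  cases outA with
  | nil => exact absurd rfl hneA
  | cons d tA =>
      rw [List.cons_append, ofC_digits d (tA ++ outB) ?hall]
      case hall =>
        intro c hc
        rw [← List.cons_append] at hc
        rcases List.mem_append.mp hc with hc' | hc'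
        · exact hdigA c hc'
        · exact hdigB c hc'
      rw [← List.cons_append, List.foldl_append, hvalA 0, hvalB]
      simp only [Option.getD_some]
      have hk : outB.length = kOf b := by rw [kOf, heqB]
      rw [← hk]
      push_cast
      rw [Int.toNat_of_nonneg ha, Int.toNat_of_nonneg hb]
      ring

theorem concat_neg (a b : Int) (ha : a < 0) (hb : 0 ≤ b) :
    concatParse a b = -((-a) * 10 ^ kOf b + b) := by
  obtain ⟨outA, heqA, hneA, hdigA, hvalA⟩ := toDigits_facts a.natAbs
  obtain ⟨outB, heqB, hneB, hdigB, hvalB⟩ := toDigits_facts b.toNat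
  have hchA : PySem.Int.toChars a = '-' :: outA := by
    rw [PySem.Int.toChars, if_pos ha, heqA]
  have hchB : PySem.Int.toChars b = outB := by
    rw [PySem.Int.toChars, if_neg (by omega), heqB]
  unfold concatParse
  rw [PySem.Int.ofStr?.eq_1, toChars_append_toList, hchA, hchB]
  cases outA with
  | nil => exact absurd rfl hneA
  | cons d tA =>
      rw [List.cons_append, List.cons_append, ofC_neg d (tA ++ outB) ?hall]
      case hall =>
        intro c hc
        rw [← List.cons_append] at hc
        rcases List.mem_append.mp hc with hc' | hc'
        · exact hdigA c hc'
        · exact hdigB c hc'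
      rw [← List.cons_append, List.foldl_append, hvalA 0, hvalB]
      simp only [Option.getD_some]
      have hk : outB.length = kOf b := by rw [kOf, heqB]
      rw [← hk]
      push_cast
      rw [Int.toNat_of_nonneg hb]
      rw [abs_of_neg ha]
      ring

theorem concat_mono (a1 a2 b : Int) (hb : 0 ≤ b) (h : a1 ≤ a2) :
    concatParse a1 b ≤ concatParse a2 b := by
  have hP : (1 : Int) ≤ 10 ^ kOf b := one_le_pow₀ (by omega)
  by_cases h1 : a1 < 0
  · rw [concat_neg a1 b h1 hb]
    by_cases h2 : a2 < 0
    · rw [concat_neg a2 b h2 hb]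
      have := mul_le_mul_of_nonneg_right (neg_le_neg h) (by omega : (0:Int) ≤ 10 ^ kOf b)
      omega
    · rw [concat_pos a2 b (by omega) hb]
      have h2' : 0 ≤ a2 * 10 ^ kOf b := mul_nonneg (by omega) (by omega)
      have h1' : (-a1) * 10 ^ kOf b ≥ 0 := mul_nonneg (by omega) (by omega)
      omega
  · rw [concat_pos a1 b (by omega) hb, concat_pos a2 b (by omega) hb]
    have := mul_le_mul_of_nonneg_right h (by omega : (0:Int) ≤ 10 ^ kOf b)
    omega

theorem concat_max (a b z : Int) (hz : 0 ≤ z) :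
    max (concatParse a z) (concatParse b z) = concatParse (max a b) z := by
  rcases le_total a b with hab | hab
  · rw [max_eq_right hab, max_eq_right (concat_mono a b z hz hab)]
  · rw [max_eq_left hab, max_eq_left (concat_mono b a z hz hab)]

/- Part 4: the combinatorial equivalence of the two loop structures. -/

def candsA : Int → List Int → List Int
  | _, [] => []
  | m, y :: ys => concatParse m y :: candsA (max m y) ys

def candsB : List Int → List Int
  | [] => []
  | x :: xs => xs.map (concatParse x) ++ candsB xs

theorem A1 (t : List Int) (m c : Int) :
    (t.foldl (fun (st : Int × Int) x => (max st.1 x, max st.2 (concatParse st.1 x))) (m, c)).2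
      = (candsA m t).foldl max c := by
  induction t generalizing m c with
  | nil => rfl
  | cons y ys ih => simpa [candsA] using ih (max m y) (max c (concatParse m y))

theorem B1 (pre row : List Int) (best : Int) :
    (PySem.List.enumerate row (pre.length : Int)).foldl
      (fun (b : Int) p => (PySem.List.slice (pre ++ row) (some (p.1 + 1)) none).foldl
        (fun b y => max b (concatParse p.2 y)) b) best
    = (candsB row).foldl max best := by
  induction row generalizing pre best with
  | nil => simp [PySem.List.enumerate_nil, candsB]
  | cons x xs ih =>
      rw [PySem.List.enumerate_cons, List.foldl_cons]
      have hcast : ((pre.length : Int) + 1) = ((pre.length + 1 : Nat) : Int) := by push_cast; ring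
      have hsl : PySem.List.slice (pre ++ x :: xs) (some ((pre.length : Int) + 1)) none = xs := by
        rw [hcast, PySem.List.slice_from_natCast]
        rw [show pre ++ x :: xs = (pre ++ [x]) ++ xs by simp]
        rw [show pre.length + 1 = (pre ++ [x]).length by simp]
        exact List.drop_left
      rw [hsl]
      have happ : pre ++ x :: xs = (pre ++ [x]) ++ xs := by simp
      have hlen : ((pre.length : Int) + 1) = (((pre ++ [x]).length : Nat) : Int) := by simp
      rw [happ, hlen, ih]
      rw [candsB, List.foldl_append, List.foldl_map]

theorem fmax_comm (l : List Int) (a b : Int) : l.foldl max (max a b) = max b (l.foldl max a) := by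
  induction l generalizing a b with
  | nil => simp [max_comm]
  | cons x xs ih =>
      simp only [List.foldl_cons]
      rw [max_right_comm a b x, ih]

theorem fmax_middle (l1 l2 : List Int) (x a : Int) :
    (l1 ++ x :: l2).foldl max a = max x ((l1 ++ l2).foldl max a) := by
  rw [List.foldl_append, List.foldl_cons, fmax_comm, ← List.foldl_append]

theorem merge (l : List Int) (a h y : Int) (hz : ∀ z ∈ l, 0 ≤ z) :
    (l.map (concatParse h) ++ l.map (concatParse y)).foldl max a
      = (l.map (concatParse (max h y))).foldl max a := by
  induction l generalizing a with
  | nil => rfl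
  | cons z zs ih =>
      have hz0 : 0 ≤ z := hz z (by simp)
      have hzs : ∀ w ∈ zs, 0 ≤ w := fun w hw => hz w (by simp [hw])
      simp only [List.map_cons, List.cons_append, List.foldl_cons]
      rw [fmax_middle, ih _ hzs, fmax_comm, ← max_assoc, max_comm (concatParse y z) _,
        concat_max h y z hz0, ← fmax_comm]

theorem mainEq (t : List Int) (h c : Int) (ht : ∀ z ∈ t, 0 ≤ z) :
    (t.map (concatParse h) ++ candsB t).foldl max c = (candsA h t).foldl max c := by
  induction t generalizing h c with
  | nil => rfl
  | cons y ys ih =>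
      have hy : 0 ≤ y := ht y (by simp)
      have hys : ∀ z ∈ ys, 0 ≤ z := fun z hz => ht z (by simp [hz])
      simp only [List.map_cons, List.cons_append, List.foldl_cons, candsB, candsA]
      rw [show ys.map (concatParse h) ++ (ys.map (concatParse y) ++ candsB ys)
            = (ys.map (concatParse h) ++ ys.map (concatParse y)) ++ candsB ys by simp]
      rw [List.foldl_append, merge ys _ h y hys, ← List.foldl_append]
      exact ih (max h y) (max c (concatParse h y)) hys

theorem perRow (h : Int) (t : List Int) (ht : ∀ z ∈ t, 0 ≤ z) :
    (t.foldl (fun (st : Int × Int) x => (max st.1 x, max st.2 (concatParse st.1 x))) (h, 0)).2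
      = (candsB (h :: t)).foldl max 0 := by
  rw [A1, candsB, ← mainEq t h 0 ht]

theorem rows_eq (rows : List (List Int)) (a : Int)
    (hne : ∀ r ∈ rows, r ≠ []) (hnn : ∀ r ∈ rows, ∀ z ∈ r.tail, 0 ≤ z) :
    rows.foldl (fun s row =>
      let big0 := (PySem.List.pyGet? row 0).getD 0
      let res := row.tail.foldl
        (fun (st : Int × Int) x => (max st.1 x, max st.2 (concatParse st.1 x))) (big0, 0)
      s + res.2) a
    = rows.foldl (fun total row =>
      let best := (PySem.List.enumerate row 0).foldl (fun (best : Int) p =>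
        (PySem.List.slice row (some (p.1 + 1)) none).foldl
          (fun best y => max best (concatParse p.2 y)) best) 0
      total + best) a := by
  induction rows generalizing a with
  | nil => rfl
  | cons row rest ih =>
      simp only [List.foldl_cons]
      have hr : row ≠ [] := hne row (by simp)
      cases row with
      | nil => exact absurd rfl hr
      | cons h t =>
          have ht : ∀ z ∈ t, 0 ≤ z := fun z hz => hnn (h :: t) (by simp) z hz
          have hA : (PySem.List.pyGet? (h :: t) 0).getD 0 = h := by
            simp [PySem.List.pyGet?, PySem.List.pyIdx?]
          have hB : (PySem.List.enumerate (h :: t) 0).foldl (fun (best : Int) p =>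
              (PySem.List.slice (h :: t) (some (p.1 + 1)) none).foldl
                (fun best y => max best (concatParse p.2 y)) best) 0
              = (candsB (h :: t)).foldl max 0 := by
            have := B1 [] (h :: t) 0
            simpa using this
          simp only [hA, List.tail_cons, hB, perRow h t ht]
          exact ih _ (fun r hrm => hne r (by simp [hrm]))
            (fun r hrm => hnn r (by simp [hrm]))

-- ===== VERDICT (by name: the statement is the Claim_ definition above) =====
theorem solution_spec : Claim_equal_solution := by
  intro rows _ hpre
  unfold Spec_solution solution solution_alt
  exact rows_eq rows 0 hpre.1 hpre.2

@[simp] theorem solution_raises : Claim_raises_solution := by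
  unfold Claim_raises_solution
  exact ⟨by rintro rows _ ⟨⟨row, hrow, hempty⟩, _⟩ ⟨hne, _⟩; exact hne row hrow hempty, by decide⟩
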